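-- pv_equiv track=rewrite | github.com/charmwizwsh/algorithms_2022 | Урок 1. Практическое задание/task_3.py | find_year_val1
-- ===== SOURCE A (Python) =====
-- def find_year_val1(mp_dict):
--     c = []                            #O(1)
--     if len(mp_dict) > 0:              #O(n)
--         d = mp_dict                   #O(1)
--         a = sorted(list(d.values()))  #O(N log N)
--         b = a[-3:len(a)]              #O(n)
--         for key in d.keys():          #O(n)
--             if d[key] in b:           #O(1) (у нас же всегда будет именно 3 элемента)
--                 c.append(key)         #O(1)
--     return c
-- ===== SOURCE B (Python) =====
-- def find_year_val1(mp_dict):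
--     # A key's value is among the top-3 (with multiplicity) iff strictly fewer
--     # than 3 values are strictly greater than it: no sorting or slicing needed.
--     vals = list(mp_dict.values())
--     return [k for k in mp_dict if sum(1 for v in vals if v > mp_dict[k]) < 3]
-- ===== Notes on version B (the rewrite author's own statement) =====
-- stated objective: alternative
-- what changed: Replaced sort-then-slice-then-membership with a direct per-key count: keep a key iff strictly fewer than 3 values are strictly greater than its value, so no sorted copy or top-3 slice is built.
import Mathlib
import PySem

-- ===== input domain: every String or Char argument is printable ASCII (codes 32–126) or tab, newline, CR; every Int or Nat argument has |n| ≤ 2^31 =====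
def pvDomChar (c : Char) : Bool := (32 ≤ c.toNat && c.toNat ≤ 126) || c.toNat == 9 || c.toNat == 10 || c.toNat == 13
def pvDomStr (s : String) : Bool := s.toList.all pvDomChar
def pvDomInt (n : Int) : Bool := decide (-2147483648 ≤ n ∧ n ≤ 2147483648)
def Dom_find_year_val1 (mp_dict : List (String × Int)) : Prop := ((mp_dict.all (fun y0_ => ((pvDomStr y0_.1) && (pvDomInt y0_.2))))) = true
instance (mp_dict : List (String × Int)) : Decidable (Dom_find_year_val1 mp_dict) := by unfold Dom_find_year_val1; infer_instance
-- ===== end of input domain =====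

-- B replaces A's sort + top-3 slice + membership test by a per-key count of strictly
-- greater values (kept iff that count < 3): an alternative, sort-free decomposition.

-- ===== PORT A =====
def find_year_val1 (mp_dict : List (String × Int)) : List String :=
  let d := PySem.Dict.ofList mp_dict
  if d.size > 0 then
    let a := PySem.List.sorted d.values (fun v => v) false
    let b := PySem.List.slice a (some (-3)) (some (a.length : Int))
    -- d[key] with key drawn from d.keys() always succeeds; getD's default is never used
    d.keys.foldl (fun c key => if d.getD key 0 ∈ b then c ++ [key] else c) []
  else []

-- ===== PORT B =====
def find_year_val1_alt (mp_dict : List (String × Int)) : List String :=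
  let d := PySem.Dict.ofList mp_dict
  let vals := d.values
  -- sum(1 for v in vals if v > mp_dict[k]) is the count of such v (countP)
  d.keys.filter (fun k => decide ((vals.countP (fun v => decide (d.getD k 0 < v)) : Int) < 3))

-- ===== PRECONDITION & SPEC =====
def Spec_find_year_val1 (mp_dict : List (String × Int)) (out : List String) : Prop := out = find_year_val1_alt mp_dict
instance (mp_dict : List (String × Int)) (out : List String) : Decidable (Spec_find_year_val1 mp_dict out) := by unfold Spec_find_year_val1; infer_instance

-- ===== CLAIM (what is proved, stated in full; the proofs are below) =====
def Claim_equal_find_year_val1 : Prop := ∀ (mp_dict : List (String × Int)), Dom_find_year_val1 mp_dict → Spec_find_year_val1 mp_dict (find_year_val1 mp_dict)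

-- ===== LEMMAS AND PROOFS =====

-- On a ≤-sorted list containing v: v lies among the last three slots iff fewer than
-- three elements are strictly greater than v.
lemma mem_drop_iff_countP_lt (a : List Int) (hs : a.Pairwise (· ≤ ·)) (v : Int) (hv : v ∈ a) :
    v ∈ a.drop (a.length - 3) ↔ a.countP (fun w => decide (v < w)) < 3 := by
  set p : Int → Bool := fun w => decide (v < w) with hp
  set k := a.length - 3 with hk
  have hle : ∀ x ∈ a.take k, ∀ y ∈ a.drop k, x ≤ y := by
    have h := hs
    rw [← List.take_append_drop k a, List.pairwise_append] at h
    exact h.2.2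
  have hcount : (a.take k).countP p + (a.drop k).countP p = a.countP p := by
    rw [← List.countP_append, List.take_append_drop]
  have hlen_drop : (a.drop k).length = a.length - k := List.length_drop ..
  constructor
  · intro hmem
    have h1 : (a.take k).countP p = 0 := by
      rw [List.countP_eq_zero]
      intro x hx
      have := hle x hx v hmem
      simp [hp]; omega
    obtain ⟨s, t, hst⟩ := List.append_of_mem hmem
    have h2 : (a.drop k).countP p ≤ s.length + t.length := by
      rw [hst, List.countP_append, List.countP_cons]
      have : p v = false := by simp [hp]
      simp [this]
      exact Nat.add_le_add (List.countP_le_length) (List.countP_le_length)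
    have h3 : (a.drop k).length = s.length + 1 + t.length := by simp [hst]; omega
    omega
  · intro hlt
    by_contra hmem
    have hlen3 : 3 ≤ a.length := by
      by_contra hsmall
      have : k = 0 := by omega
      rw [this, List.drop_zero] at hmem
      exact hmem hv
    have hall : ∀ y ∈ a.drop k, p y = true := by
      intro y hy
      have hvy : v ≤ y := by
        have hv' : v ∈ a.take k := by
          have := hv
          rw [← List.take_append_drop k a, List.mem_append] at this
          rcases this with h | h
          · exact h
          · exact absurd h hmem
        exact hle v hv' y hy
      have hne : v ≠ y := fun h => hmem (h ▸ hy)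
      simp [hp]; omega
    have : (a.drop k).countP p = (a.drop k).length := List.countP_eq_length.mpr hall
    omega

-- ===== VERDICT (by name: the statement is the Claim_ definition above) =====
theorem find_year_val1_spec : Claim_equal_find_year_val1 := by
  intro mp _
  unfold Spec_find_year_val1
  show find_year_val1 mp = find_year_val1_alt mp
  simp only [find_year_val1, find_year_val1_alt]
  set d := PySem.Dict.ofList mp with hd
  have hnd : d.keys.Nodup := PySem.Dict.nodup_keys_ofList mp
  by_cases hsz : d.size > 0
  · rw [if_pos hsz]
    rw [PySem.List.foldl_append_ite_eq_filter]
    rw [List.nil_append]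
    apply List.filter_congr
    intro k hk
    have hvmem : d.getD k 0 ∈ d.values := by
      rw [PySem.Dict.values_eq_map_keys d hnd 0]
      exact List.mem_map_of_mem hk
    set v := d.getD k 0 with hv
    simp only [decide_eq_decide]
    set a := PySem.List.sorted d.values (fun v => v) false with ha
    have hslice : PySem.List.slice a (some (-3)) (some (a.length : Int)) = a.drop (a.length - 3) := by
      simp [PySem.List.slice, PySem.List.clampIdx]
      split_ifs with h0 h1 h1
      · omega
      · omega
      · have : a.length - 3 = 0 := by omega
        simp [this]
      · have h3 : ((a.length : Int) + -3).toNat = a.length - 3 := by omega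
        rw [h3]
        exact List.take_of_length_le (by simp)
    rw [hslice]
    have hs : a.Pairwise (· ≤ ·) := PySem.List.sorted_pairwise d.values (fun v => v) 
    have hva : v ∈ a := (PySem.List.mem_sorted d.values (fun v => v) false v).mpr hvmem
    have hperm : a.Perm d.values := PySem.List.sorted_perm d.values (fun v => v) false
    have hcnt : a.countP (fun w => decide (v < w)) = d.values.countP (fun w => decide (v < w)) :=
      hperm.countP_eq _
    rw [mem_drop_iff_countP_lt a hs v hva, hcnt]
    omega
  · rw [if_neg hsz]
    have : d.keys = [] := by
      have h0 : d.items.length = 0 := by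
        simp only [PySem.Dict.size] at hsz; omega
      have : d.items = [] := List.length_eq_zero_iff.mp h0
      simp [PySem.Dict.keys, this]
    simp [this]
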